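-- pv_equiv track=rewrite | github.com/GuanshiyinPusa/COMP10001 | Project1/question-3.py | assign_pony_to_path
-- ===== SOURCE A (Python) =====
-- def closest_greater_or_equal_number(arr, target):
--     closest_tuple = None
--     min_diff = None
--     for tup in arr:
--         if tup[0] + tup[1] < target:
--             continue
--         diff = abs(tup[0] + tup[1] - target)
--         if not closest_tuple or diff < min_diff:
--             min_diff = diff
--             closest_tuple = tup
--     return closest_tuple
--
-- def assign_pony_to_path(elevations, assign_path, capacities):
--     final_elevation = [elevations[x][y] for x, y in assign_path]
--     distance = [(final_elevation[i + 1] - final_elevation[i])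
--                 for i in range(len(final_elevation) - 1)]
--     ans_capacity = []
--     for m in distance:
--         possible_capacities = [(capacities[i], capacities[j]) for i in range(len(capacities)) for j in
--                                range(i, len(capacities))]
--         ans_capacity.append(closest_greater_or_equal_number(possible_capacities, m))
--     return ans_capacity
-- ===== SOURCE B (Python) =====
-- def _bisect_ge(sums, target, lo, hi):
--     # least index in [lo, hi) range semantics: first index with sums[idx] >= target
--     if lo >= hi:
--         return lo
--     mid = (lo + hi) // 2
--     if sums[mid] < target:
--         return _bisect_ge(sums, target, mid + 1, hi)
--     return _bisect_ge(sums, target, lo, mid)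
--
--
-- def assign_pony_to_path(elevations, assign_path, capacities):
--     final_elevation = [elevations[x][y] for x, y in assign_path]
--     n = len(capacities)
--     first_pair = {}
--     for i in range(n):
--         for j in range(i, n):
--             s = capacities[i] + capacities[j]
--             if s not in first_pair:
--                 first_pair[s] = (capacities[i], capacities[j])
--     sums = sorted(first_pair)
--     ans_capacity = []
--     for k in range(len(final_elevation) - 1):
--         m = final_elevation[k + 1] - final_elevation[k]
--         lo = _bisect_ge(sums, m, 0, len(sums))
--         ans_capacity.append(first_pair[sums[lo]] if lo < len(sums) else None)
--     return ans_capacity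
-- ===== Notes on version B (the rewrite author's own statement) =====
-- stated objective: faster
-- what changed: Instead of rebuilding the full O(n^2) capacity-pair list and scanning it for every distance, B builds once a dict mapping each distinct pair-sum to its first pair, sorts the distinct sums, and answers each distance with a binary search for the smallest sum >= the distance.
import Mathlib
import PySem

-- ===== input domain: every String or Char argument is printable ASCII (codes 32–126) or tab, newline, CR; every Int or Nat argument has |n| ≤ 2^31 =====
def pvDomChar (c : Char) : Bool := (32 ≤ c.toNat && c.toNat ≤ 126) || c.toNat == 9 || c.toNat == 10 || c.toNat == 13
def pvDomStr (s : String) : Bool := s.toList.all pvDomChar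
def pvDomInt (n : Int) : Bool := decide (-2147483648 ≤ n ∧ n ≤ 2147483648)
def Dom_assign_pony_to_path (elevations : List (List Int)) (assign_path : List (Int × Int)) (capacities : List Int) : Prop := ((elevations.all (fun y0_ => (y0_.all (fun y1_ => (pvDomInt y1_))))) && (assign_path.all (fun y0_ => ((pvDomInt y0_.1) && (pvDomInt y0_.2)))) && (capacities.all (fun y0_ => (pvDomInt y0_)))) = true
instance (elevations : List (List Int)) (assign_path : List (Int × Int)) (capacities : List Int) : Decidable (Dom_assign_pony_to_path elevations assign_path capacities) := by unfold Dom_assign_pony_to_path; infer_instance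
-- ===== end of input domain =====

-- B replaces A's per-distance scan over all O(n^2) capacity pairs by a precomputed
-- first-pair-per-sum dict plus a binary search over the sorted distinct sums (objective: faster).

-- ===== PORT A =====
-- literal port of closest_greater_or_equal_number: state (closest_tuple, min_diff)
def pvClosest (arr : List (Int × Int)) (target : Int) : Option (Int × Int) :=
  (arr.foldl
    (fun (st : Option (Int × Int) × Option Int) tup =>
      if tup.1 + tup.2 < target then st
      else
        let diff := |tup.1 + tup.2 - target|
        -- 'not closest_tuple or diff < min_diff' (min_diff is set whenever closest_tuple is)
        if st.1.isNone || (match st.2 with | some d => decide (diff < d) | none => false) then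
          (some tup, some diff)
        else st)
    (none, none)).1

def assign_pony_to_path (elevations : List (List Int)) (assign_path : List (Int × Int)) (capacities : List Int) : List (Option (Int × Int)) :=
  let final_elevation := assign_path.map (fun p => PySem.List.pyGetD (PySem.List.pyGetD elevations p.1 []) p.2 0)
  let distance := (PySem.List.pyRange 0 ((final_elevation.length : Int) - 1) 1).map
      (fun i => PySem.List.pyGetD final_elevation (i + 1) 0 - PySem.List.pyGetD final_elevation i 0)
  distance.foldl
    (fun ans m =>
      let possible_capacities := (PySem.List.pyRange 0 (capacities.length : Int) 1).flatMap
        (fun i => (PySem.List.pyRange i (capacities.length : Int) 1).map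
          (fun j => (PySem.List.pyGetD capacities i 0, PySem.List.pyGetD capacities j 0)))
      ans ++ [pvClosest possible_capacities m])
    []

-- ===== PORT B =====
-- literal port of _bisect_ge; the fuel argument (hi - lo bounds the recursion depth)
-- only makes the same recursion structural and never changes the result
def pvBisectGeAux (sums : List Int) (target : Int) : Nat → Nat → Nat → Nat
  | 0, lo, _ => lo
  | fuel + 1, lo, hi =>
    if lo ≥ hi then lo
    else
      let mid := (lo + hi) / 2
      if sums.getD mid 0 < target then pvBisectGeAux sums target fuel (mid + 1) hi
      else pvBisectGeAux sums target fuel lo mid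

def pvBisectGe (sums : List Int) (target : Int) (lo hi : Nat) : Nat :=
  pvBisectGeAux sums target (hi - lo) lo hi

def assign_pony_to_path_alt (elevations : List (List Int)) (assign_path : List (Int × Int)) (capacities : List Int) : List (Option (Int × Int)) :=
  let final_elevation := assign_path.map (fun p => PySem.List.pyGetD (PySem.List.pyGetD elevations p.1 []) p.2 0)
  let n : Int := capacities.length
  let first_pair := (PySem.List.pyRange 0 n 1).foldl
    (fun d i => (PySem.List.pyRange i n 1).foldl
      (fun (d : PySem.Dict Int (Int × Int)) j =>
        let s := PySem.List.pyGetD capacities i 0 + PySem.List.pyGetD capacities j 0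
        if d.contains s then d
        else d.insert s (PySem.List.pyGetD capacities i 0, PySem.List.pyGetD capacities j 0)) d)
    PySem.Dict.empty
  let sums := PySem.List.sorted first_pair.keys (fun x => x) false
  (PySem.List.pyRange 0 ((final_elevation.length : Int) - 1) 1).foldl
    (fun ans k =>
      let m := PySem.List.pyGetD final_elevation (k + 1) 0 - PySem.List.pyGetD final_elevation k 0
      let lo := pvBisectGe sums m 0 sums.length
      -- first_pair[sums[lo]] : the key is present, so the lookup default is never used
      ans ++ [if lo < sums.length then some (first_pair.getD (sums.getD lo 0) (0, 0)) else none])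
    []

-- ===== PRECONDITION & SPEC =====
-- Pre_: exactly the inputs where every (x, y) in assign_path is a valid (possibly negative)
-- Python index into elevations and its selected row; elsewhere A raises IndexError.
def Pre_assign_pony_to_path (elevations : List (List Int)) (assign_path : List (Int × Int)) (capacities : List Int) : Prop :=
  ∀ p ∈ assign_path, PySem.Raise.InRange elevations.length p.1 ∧
    PySem.Raise.InRange (PySem.List.pyGetD elevations p.1 []).length p.2
instance (elevations : List (List Int)) (assign_path : List (Int × Int)) (capacities : List Int) : Decidable (Pre_assign_pony_to_path elevations assign_path capacities) := by unfold Pre_assign_pony_to_path; infer_instance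

def pvWitness_assign_pony_to_path : List (List Int) × (List (Int × Int)) × List Int :=
  ([[1, 5], [3]], [(0, 1), (1, 0), (0, 0)], [1, 2, 4])

def Spec_assign_pony_to_path (elevations : List (List Int)) (assign_path : List (Int × Int)) (capacities : List Int) (out : List (Option (Int × Int))) : Prop := out = assign_pony_to_path_alt elevations assign_path capacities
instance (elevations : List (List Int)) (assign_path : List (Int × Int)) (capacities : List Int) (out : List (Option (Int × Int))) : Decidable (Spec_assign_pony_to_path elevations assign_path capacities out) := by unfold Spec_assign_pony_to_path; infer_instance

-- ===== CLAIM (what is proved, stated in full; the proofs are below) =====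
def Claim_equal_assign_pony_to_path : Prop := ∀ (elevations : List (List Int)) (assign_path : List (Int × Int)) (capacities : List Int), Dom_assign_pony_to_path elevations assign_path capacities → Pre_assign_pony_to_path elevations assign_path capacities → Spec_assign_pony_to_path elevations assign_path capacities (assign_pony_to_path elevations assign_path capacities)

-- ===== LEMMAS AND PROOFS =====

-- the common pair enumeration (proof-only helper; definitionally A's possible_capacities)
def pvPairs (capacities : List Int) : List (Int × Int) :=
  (PySem.List.pyRange 0 (capacities.length : Int) 1).flatMap
    (fun i => (PySem.List.pyRange i (capacities.length : Int) 1).map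
      (fun j => (PySem.List.pyGetD capacities i 0, PySem.List.pyGetD capacities j 0)))

-- reference "first minimal qualifying pair" spec (proof-only)
def pvBest (m : Int) : List (Int × Int) → Option (Int × Int)
  | [] => none
  | t :: l =>
    if t.1 + t.2 < m then pvBest m l
    else
      match pvBest m l with
      | none => some t
      | some u => if t.1 + t.2 ≤ u.1 + u.2 then some t else some u

-- the fold step of pvClosest, named (proof-only)
def pvStepA (target : Int) (st : Option (Int × Int) × Option Int) (tup : Int × Int) :
    Option (Int × Int) × Option Int :=
  if tup.1 + tup.2 < target then st
  else
    let diff := |tup.1 + tup.2 - target|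
    if st.1.isNone || (match st.2 with | some d => decide (diff < d) | none => false) then
      (some tup, some diff)
    else st

theorem pvClosest_eq_foldA (arr : List (Int × Int)) (target : Int) :
    pvClosest arr target = (arr.foldl (pvStepA target) (none, none)).1 := rfl

-- the dict-building step of B, named (proof-only)
def pvStep0 (d : PySem.Dict Int (Int × Int)) (t : Int × Int) : PySem.Dict Int (Int × Int) :=
  if d.contains (t.1 + t.2) then d else d.insert (t.1 + t.2) t

theorem pvBest_none_iff (m : Int) (l : List (Int × Int)) :
    pvBest m l = none ↔ ∀ t ∈ l, t.1 + t.2 < m := by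
  induction l with
  | nil => simp [pvBest]
  | cons t l ih =>
    simp only [pvBest]
    split_ifs with h
    · rw [ih]; simp [h]
    · cases hb : pvBest m l with
      | none =>
        simp only [hb]
        exact ⟨fun H => absurd H (by simp), fun H => absurd (H t (by simp)) h⟩
      | some w =>
        simp only [hb]
        constructor
        · intro H; split_ifs at H <;> simp_all
        · intro H; exact absurd (H t (by simp)) h

theorem pvBest_some (m : Int) (l : List (Int × Int)) (u : Int × Int) (h : pvBest m l = some u) :
    u ∈ l ∧ m ≤ u.1 + u.2 ∧ ∀ t ∈ l, m ≤ t.1 + t.2 → u.1 + u.2 ≤ t.1 + t.2 := by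
  induction l generalizing u with
  | nil => simp [pvBest] at h
  | cons t l ih =>
    simp only [pvBest] at h
    split_ifs at h with ht
    · obtain ⟨h1, h2, h3⟩ := ih u h
      exact ⟨by simp [h1], h2, by
        intro s hs hms
        rcases List.mem_cons.mp hs with rfl | hs
        · omega
        · exact h3 s hs hms⟩
    · cases hb : pvBest m l with
      | none =>
        simp only [hb] at h
        cases h
        refine ⟨by simp, by omega, ?_⟩
        intro s hs hms
        rcases List.mem_cons.mp hs with rfl | hs
        · omega
        · exact absurd ((pvBest_none_iff m l).mp hb s hs) (by omega)
      | some w =>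
        simp only [hb] at h
        obtain ⟨h1, h2, h3⟩ := ih w hb
        split_ifs at h with hle <;> cases h
        · refine ⟨by simp, by omega, ?_⟩
          intro s hs hms
          rcases List.mem_cons.mp hs with rfl | hs
          · omega
          · exact le_trans hle (h3 s hs hms)
        · refine ⟨by simp [h1], h2, ?_⟩
          intro s hs hms
          rcases List.mem_cons.mp hs with rfl | hs
          · omega
          · exact h3 s hs hms

theorem pvBest_find (m : Int) (l : List (Int × Int)) (u : Int × Int) (h : pvBest m l = some u) :
    l.find? (fun t => t.1 + t.2 == u.1 + u.2) = some u := by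
  induction l generalizing u with
  | nil => simp [pvBest] at h
  | cons t l ih =>
    simp only [pvBest] at h
    split_ifs at h with ht
    · have h2 := (pvBest_some m l u h).2.1
      rw [List.find?_cons_of_neg (by simp; omega)]
      exact ih u h
    · cases hb : pvBest m l with
      | none =>
        simp only [hb] at h; cases h
        exact List.find?_cons_of_pos (by simp)
      | some w =>
        simp only [hb] at h
        have hw := (pvBest_some m l w hb).2.1
        split_ifs at h with hle <;> cases h
        · exact List.find?_cons_of_pos (by simp)
        · rw [List.find?_cons_of_neg (by simp; omega)]
          exact ih _ hb

theorem pvFoldA_some (m : Int) (l : List (Int × Int)) :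
    ∀ u : Int × Int, m ≤ u.1 + u.2 →
      l.foldl (pvStepA m) (some u, some (u.1 + u.2 - m)) =
        match pvBest m l with
        | none => (some u, some (u.1 + u.2 - m))
        | some w => if w.1 + w.2 < u.1 + u.2 then (some w, some (w.1 + w.2 - m))
                    else (some u, some (u.1 + u.2 - m)) := by
  induction l with
  | nil => intro u hu; rfl
  | cons t l ih =>
    intro u hu
    rw [List.foldl_cons]
    by_cases ht : t.1 + t.2 < m
    · have hstep : pvStepA m (some u, some (u.1 + u.2 - m)) t = (some u, some (u.1 + u.2 - m)) := by
        simp [pvStepA, ht]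
      rw [hstep, ih u hu]
      simp only [pvBest, if_pos ht]
    · have habs : |t.1 + t.2 - m| = t.1 + t.2 - m := abs_of_nonneg (by omega)
      by_cases htu : t.1 + t.2 < u.1 + u.2
      · have hstep : pvStepA m (some u, some (u.1 + u.2 - m)) t = (some t, some (t.1 + t.2 - m)) := by
          simp [pvStepA, ht, habs]
          omega
        rw [hstep, ih t (by omega)]
        simp only [pvBest, if_neg ht]
        cases hb : pvBest m l with
        | none => simp only [hb]; rw [if_pos htu]
        | some w =>
          simp only [hb]
          rcases le_or_gt (t.1 + t.2) (w.1 + w.2) with hA | hA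
          · simp only [if_pos hA]
            try split_ifs with h1 h2 h3
            all_goals first | rfl | omega
          · simp only [if_neg (not_le.mpr hA)]
            try split_ifs with h1 h2 h3
            all_goals first | rfl | omega
      · have hstep : pvStepA m (some u, some (u.1 + u.2 - m)) t = (some u, some (u.1 + u.2 - m)) := by
          simp [pvStepA, ht, habs]
          exact fun h => absurd h htu
        rw [hstep, ih u hu]
        simp only [pvBest, if_neg ht]
        cases hb : pvBest m l with
        | none => simp only [hb]; rw [if_neg htu]
        | some w =>
          simp only [hb]
          rcases le_or_gt (t.1 + t.2) (w.1 + w.2) with hA | hA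
          · simp only [if_pos hA]
            try split_ifs with h1 h2 h3
            all_goals first | rfl | omega
          · simp only [if_neg (not_le.mpr hA)]
            try split_ifs with h1 h2 h3
            all_goals first | rfl | omega

theorem pvFoldA_none (m : Int) (l : List (Int × Int)) :
    l.foldl (pvStepA m) (none, none) =
      match pvBest m l with
      | none => ((none : Option (Int × Int)), (none : Option Int))
      | some w => (some w, some (w.1 + w.2 - m)) := by
  induction l with
  | nil => rfl
  | cons t l ih =>
    rw [List.foldl_cons]
    by_cases ht : t.1 + t.2 < m
    · have hstep : pvStepA m (none, none) t = (none, none) := by simp [pvStepA, ht]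
      rw [hstep, ih]
      simp only [pvBest, if_pos ht]
    · have habs : |t.1 + t.2 - m| = t.1 + t.2 - m := abs_of_nonneg (by omega)
      have hstep : pvStepA m (none, none) t = (some t, some (t.1 + t.2 - m)) := by
        simp [pvStepA, ht, habs]
      rw [hstep, pvFoldA_some m l t (by omega)]
      simp only [pvBest, if_neg ht]
      cases hb : pvBest m l with
      | none => simp only [hb]
      | some w =>
        simp only [hb]
        rcases le_or_gt (t.1 + t.2) (w.1 + w.2) with hA | hA
        · simp only [if_pos hA]
          try split_ifs with h1 h2
          all_goals first | rfl | omega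
        · simp only [if_neg (not_le.mpr hA)]
          try split_ifs with h1 h2
          all_goals first | rfl | omega

theorem pvClosest_eq_pvBest (l : List (Int × Int)) (m : Int) :
    pvClosest l m = pvBest m l := by
  rw [pvClosest_eq_foldA, pvFoldA_none]
  cases hb : pvBest m l <;> simp

theorem pvBuild_get? (l : List (Int × Int)) :
    ∀ (d : PySem.Dict Int (Int × Int)) (s : Int),
      (l.foldl pvStep0 d).get? s =
        match d.get? s with
        | some v => some v
        | none => l.find? (fun t => t.1 + t.2 == s) := by
  induction l with
  | nil => intro d s; cases hd : d.get? s <;> simp [hd]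
  | cons t l ih =>
    intro d s
    rw [List.foldl_cons, ih]
    by_cases hc : d.contains (t.1 + t.2)
    · simp only [pvStep0, if_pos hc]
      cases hd : d.get? s with
      | some v => rfl
      | none =>
        by_cases hts : t.1 + t.2 = s
        · exact absurd ((PySem.Dict.get?_eq_none_iff_contains d s).mp hd)
            (by rw [← hts]; simp [hc])
        · rw [List.find?_cons_of_neg (by simp [hts])]
    · simp only [pvStep0, if_neg hc]
      rw [PySem.Dict.get?_insert]
      by_cases hts : s = t.1 + t.2
      · simp only [if_pos hts]
        have hd : d.get? s = none := by
          rw [PySem.Dict.get?_eq_none_iff_contains, hts]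
          exact Bool.not_eq_true _ ▸ (by simpa using hc)
        rw [hd, List.find?_cons_of_pos (by simp [hts])]
      · simp only [if_neg hts]
        cases hd : d.get? s with
        | some v => rfl
        | none => rw [List.find?_cons_of_neg (by simp; omega)]

theorem pvBuild_nodup (l : List (Int × Int)) :
    ∀ d : PySem.Dict Int (Int × Int), d.keys.Nodup → (l.foldl pvStep0 d).keys.Nodup := by
  induction l with
  | nil => exact fun d h => h
  | cons t l ih =>
    intro d h
    rw [List.foldl_cons]
    refine ih _ ?_
    unfold pvStep0
    split_ifs with hc
    · exact h
    · exact PySem.Dict.nodup_keys_insert d _ t h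

theorem pvBisectGe_spec (sums : List Int) (m : Int) (hs : sums.Pairwise (· ≤ ·)) :
    ∀ lo hi, lo ≤ hi → hi ≤ sums.length →
      lo ≤ pvBisectGe sums m lo hi ∧ pvBisectGe sums m lo hi ≤ hi ∧
      (∀ j, lo ≤ j → j < pvBisectGe sums m lo hi → sums.getD j 0 < m) ∧
      (pvBisectGe sums m lo hi < hi → m ≤ sums.getD (pvBisectGe sums m lo hi) 0) := by
  have hmono : ∀ p q : Nat, p ≤ q → q < sums.length → sums.getD p 0 ≤ sums.getD q 0 := by
    intro p q hpq hq
    rcases Nat.eq_or_lt_of_le hpq with rfl | hlt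
    · exact le_refl _
    · have := List.pairwise_iff_getElem.mp hs p q (by omega) hq hlt
      rw [List.getD_eq_getElem _ _ (by omega), List.getD_eq_getElem _ _ hq]
      exact this
  suffices H : ∀ (n lo hi : Nat), hi - lo ≤ n → lo ≤ hi → hi ≤ sums.length →
      lo ≤ pvBisectGeAux sums m n lo hi ∧ pvBisectGeAux sums m n lo hi ≤ hi ∧
      (∀ j, lo ≤ j → j < pvBisectGeAux sums m n lo hi → sums.getD j 0 < m) ∧
      (pvBisectGeAux sums m n lo hi < hi → m ≤ sums.getD (pvBisectGeAux sums m n lo hi) 0) by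
    intro lo hi h1 h2
    exact H (hi - lo) lo hi (le_refl _) h1 h2
  intro n
  induction n with
  | zero =>
    intro lo hi hn h1 h2
    simp only [pvBisectGeAux]
    exact ⟨le_refl _, by omega, by omega, by omega⟩
  | succ n ih =>
    intro lo hi hn h1 h2
    rw [pvBisectGeAux]
    by_cases hge : lo ≥ hi
    · rw [if_pos hge]
      exact ⟨le_refl _, by omega, by omega, by omega⟩
    · rw [if_neg hge]
      simp only []
      split_ifs with hlt
      · obtain ⟨i1, i2, i3, i4⟩ := ih ((lo + hi) / 2 + 1) hi (by omega) (by omega) h2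
        refine ⟨by omega, i2, ?_, i4⟩
        intro j hj1 hj2
        by_cases hjm : j ≤ (lo + hi) / 2
        · exact lt_of_le_of_lt (hmono j ((lo + hi) / 2) hjm (by omega)) hlt
        · exact i3 j (by omega) hj2
      · obtain ⟨i1, i2, i3, i4⟩ := ih lo ((lo + hi) / 2) (by omega) (by omega) (by omega)
        refine ⟨i1, by omega, i3, ?_⟩
        intro hr
        rcases Nat.lt_or_ge (pvBisectGeAux sums m n lo ((lo + hi) / 2)) ((lo + hi) / 2) with hc | hc
        · exact i4 hc
        · have heq : pvBisectGeAux sums m n lo ((lo + hi) / 2) = (lo + hi) / 2 := by omega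
          rw [heq]
          omega


-- the main per-distance equality
theorem pvMain (c : List Int) (m : Int) :
    pvClosest (pvPairs c) m =
      (if pvBisectGe (PySem.List.sorted ((pvPairs c).foldl pvStep0 PySem.Dict.empty).keys (fun x => x) false) m 0
            (PySem.List.sorted ((pvPairs c).foldl pvStep0 PySem.Dict.empty).keys (fun x => x) false).length <
          (PySem.List.sorted ((pvPairs c).foldl pvStep0 PySem.Dict.empty).keys (fun x => x) false).length
       then some (((pvPairs c).foldl pvStep0 PySem.Dict.empty).getD
              ((PySem.List.sorted ((pvPairs c).foldl pvStep0 PySem.Dict.empty).keys (fun x => x) false).getD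
                (pvBisectGe (PySem.List.sorted ((pvPairs c).foldl pvStep0 PySem.Dict.empty).keys (fun x => x) false) m 0
                  (PySem.List.sorted ((pvPairs c).foldl pvStep0 PySem.Dict.empty).keys (fun x => x) false).length) 0) (0, 0))
       else none) := by
  have hnodup : ((pvPairs c).foldl pvStep0 PySem.Dict.empty).keys.Nodup :=
    pvBuild_nodup _ _ PySem.Dict.nodup_keys_empty
  set fp := (pvPairs c).foldl pvStep0 PySem.Dict.empty with hfp
  set ss := PySem.List.sorted fp.keys (fun x => x) false with hss
  have hperm : ss.Perm fp.keys := PySem.List.sorted_perm _ _ _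
  have hssnd : ss.Nodup := hperm.nodup_iff.mpr hnodup
  have hpw : ss.Pairwise (· ≤ ·) := PySem.List.sorted_pairwise fp.keys (fun x => x)
  have hget : ∀ s, fp.get? s = (pvPairs c).find? (fun t => t.1 + t.2 == s) := by
    intro s
    rw [hfp, pvBuild_get?]
    simp
  have hmemss : ∀ s : Int, s ∈ ss ↔ ∃ t ∈ pvPairs c, t.1 + t.2 = s := by
    intro s
    rw [PySem.List.mem_sorted, ← PySem.Dict.contains_iff_mem_keys]
    constructor
    · intro hmem
      have hne : fp.get? s ≠ none := by
        intro h
        rw [PySem.Dict.get?_eq_none_iff_contains] at h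
        exact absurd hmem (by simp [h])
      rw [hget] at hne
      cases hf : (pvPairs c).find? (fun t => t.1 + t.2 == s) with
      | none => exact absurd hf hne
      | some t =>
        exact ⟨t, List.mem_of_find?_eq_some hf, by simpa using List.find?_some hf⟩
    · rintro ⟨t, ht, rfl⟩
      by_contra hcon
      have hnone : fp.get? (t.1 + t.2) = none := by
        rw [PySem.Dict.get?_eq_none_iff_contains]
        simpa using hcon
      rw [hget] at hnone
      have := List.find?_eq_none.mp hnone t ht
      simp at this
  have hmono : ∀ p q : Nat, p ≤ q → q < ss.length → ss.getD p 0 ≤ ss.getD q 0 := by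
    intro p q hpq hq
    rcases Nat.eq_or_lt_of_le hpq with rfl | hlt
    · exact le_refl _
    · have := List.pairwise_iff_getElem.mp hpw p q (by omega) hq hlt
      rw [List.getD_eq_getElem _ _ (by omega), List.getD_eq_getElem _ _ hq]
      exact this
  obtain ⟨s1, s2, s3, s4⟩ := pvBisectGe_spec ss m hpw 0 ss.length (by omega) (le_refl _)
  set lo := pvBisectGe ss m 0 ss.length with hlodef
  rw [pvClosest_eq_pvBest]
  by_cases hlo : lo < ss.length
  · rw [if_pos hlo]
    have hsge : m ≤ ss.getD lo 0 := s4 hlo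
    have hsmem : ss.getD lo 0 ∈ ss := by
      rw [List.getD_eq_getElem _ _ hlo]
      exact List.getElem_mem _
    obtain ⟨t0, ht0, ht0s⟩ := (hmemss _).mp hsmem
    cases hb : pvBest m (pvPairs c) with
    | none => exact absurd ((pvBest_none_iff _ _).mp hb t0 ht0) (by omega)
    | some u =>
      obtain ⟨hu1, hu2, hu3⟩ := pvBest_some _ _ _ hb
      have husum : u.1 + u.2 ∈ ss := (hmemss _).mpr ⟨u, hu1, rfl⟩
      have hle1 : u.1 + u.2 ≤ ss.getD lo 0 := by
        rw [← ht0s]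
        exact hu3 t0 ht0 (by omega)
      have hge1 : ss.getD lo 0 ≤ u.1 + u.2 := by
        obtain ⟨j, hj, hjs⟩ := List.getElem_of_mem husum
        have hjv : ss.getD j 0 = u.1 + u.2 := by
          rw [List.getD_eq_getElem _ _ hj]
          exact hjs
        have hjlo : lo ≤ j := by
          by_contra hcj
          have := s3 j (by omega) (by omega)
          omega
        have := hmono lo j hjlo hj
        omega
      have hsum : ss.getD lo 0 = u.1 + u.2 := le_antisymm hge1 hle1
      have hfind := pvBest_find _ _ _ hb
      have : fp.getD (ss.getD lo 0) (0, 0) = u := by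
        rw [PySem.Dict.getD_eq_get?_getD, hget, hsum, hfind]
        rfl
      rw [this]
  · rw [if_neg hlo]
    rw [(pvBest_none_iff _ _).mpr ?_]
    intro t ht
    by_contra hc
    have hmem : t.1 + t.2 ∈ ss := (hmemss _).mpr ⟨t, ht, rfl⟩
    obtain ⟨j, hj, hjs⟩ := List.getElem_of_mem hmem
    have := s3 j (by omega) (by omega)
    rw [List.getD_eq_getElem _ _ hj, hjs] at this
    omega

theorem pvAltBuild_eq (c : List Int) :
    ((PySem.List.pyRange 0 (c.length : Int) 1).foldl
      (fun d i => (PySem.List.pyRange i (c.length : Int) 1).foldl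
        (fun (d : PySem.Dict Int (Int × Int)) j =>
          let s := PySem.List.pyGetD c i 0 + PySem.List.pyGetD c j 0
          if d.contains s then d
          else d.insert s (PySem.List.pyGetD c i 0, PySem.List.pyGetD c j 0)) d)
      PySem.Dict.empty) = (pvPairs c).foldl pvStep0 PySem.Dict.empty := by
  rw [pvPairs, List.foldl_flatMap]
  simp only [List.foldl_map]
  rfl

-- ===== VERDICT (by name: the statement is the Claim_ definition above) =====
theorem assign_pony_to_path_spec : Claim_equal_assign_pony_to_path := by
  intro elevations assign_path capacities _hdom _hpre
  unfold Spec_assign_pony_to_path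
  unfold assign_pony_to_path assign_pony_to_path_alt
  simp only [List.foldl_map, pvAltBuild_eq, ← pvPairs.eq_def]
  congr 1
  funext ans k
  congr 1
  rw [pvMain]
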